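-- pv_equiv track=rewrite | github.com/CamilaVineg/programaci-n-en--PYTHON | Ejercicios de python universidad/Guía de Recursividad/EJ22 - recursividad.py | usar_la_fuerza
-- ===== SOURCE A (Python) =====
-- def usar_la_fuerza(mochila, objetos_sacados=0):
--     if not mochila:
--         # No hay más objetos y no encontramos sable
--         return (False, objetos_sacados)
--
--     objeto_actual = mochila[0]
--     objetos_sacados += 1
--
--     if objeto_actual == "sable de luz":  # Punto b)
--         return (True, objetos_sacados)  # Encontramos el sable
--
--     # Si no es el sable, seguimos.
--     return usar_la_fuerza(mochila[1:], objetos_sacados)  # Punto a)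
-- ===== SOURCE B (Python) =====
-- def usar_la_fuerza(mochila, objetos_sacados=0):
--     for objeto in mochila:
--         objetos_sacados += 1
--         if objeto == "sable de luz":
--             return (True, objetos_sacados)
--     return (False, objetos_sacados)
-- ===== Notes on version B (the rewrite author's own statement) =====
-- stated objective: idiomatic
-- what changed: Replaced tail recursion with list slicing by a plain iterative for-loop threading the accumulator, with no slice copies.
import Mathlib
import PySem

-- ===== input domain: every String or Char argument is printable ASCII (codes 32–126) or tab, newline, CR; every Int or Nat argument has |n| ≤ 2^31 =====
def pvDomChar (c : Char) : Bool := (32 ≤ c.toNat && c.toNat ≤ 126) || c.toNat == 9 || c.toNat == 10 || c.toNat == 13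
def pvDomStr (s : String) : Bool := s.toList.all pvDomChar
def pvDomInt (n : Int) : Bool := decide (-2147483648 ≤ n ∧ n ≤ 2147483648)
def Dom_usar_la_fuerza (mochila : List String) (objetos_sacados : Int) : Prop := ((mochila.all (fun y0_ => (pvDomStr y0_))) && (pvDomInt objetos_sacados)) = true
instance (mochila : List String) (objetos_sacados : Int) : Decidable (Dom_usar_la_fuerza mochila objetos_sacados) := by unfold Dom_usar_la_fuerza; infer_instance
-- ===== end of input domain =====

-- B replaces A's slicing tail recursion by an iterative fold over the list (idiomatic; no slice copies).

-- ===== PORT A =====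
-- literal transliteration of A: recursion on mochila, taking the head and recursing on the tail (mochila[1:])
def usar_la_fuerza (mochila : List String) (objetos_sacados : Int) : Bool × Int :=
  match mochila with
  | [] => (false, objetos_sacados)
  | objeto_actual :: resto =>
    let objetos_sacados := objetos_sacados + 1
    if objeto_actual == "sable de luz" then (true, objetos_sacados)
    else usar_la_fuerza resto objetos_sacados

-- ===== PORT B =====
-- B's for-loop with early return, modelled as a fold carrying (done?, count)
def usar_la_fuerza_alt (mochila : List String) (objetos_sacados : Int) : Bool × Int :=
  mochila.foldl
    (fun st objeto =>
      if st.1 then st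
      else
        let c := st.2 + 1
        if objeto == "sable de luz" then (true, c) else (false, c))
    (false, objetos_sacados)

-- ===== PRECONDITION & SPEC =====
def Spec_usar_la_fuerza (mochila : List String) (objetos_sacados : Int) (out : Bool × Int) : Prop := out = usar_la_fuerza_alt mochila objetos_sacados
instance (mochila : List String) (objetos_sacados : Int) (out : Bool × Int) : Decidable (Spec_usar_la_fuerza mochila objetos_sacados out) := by unfold Spec_usar_la_fuerza; infer_instance

-- ===== CLAIM (what is proved, stated in full; the proofs are below) =====
def Claim_equal_usar_la_fuerza : Prop := ∀ (mochila : List String) (objetos_sacados : Int), Dom_usar_la_fuerza mochila objetos_sacados → Spec_usar_la_fuerza mochila objetos_sacados (usar_la_fuerza mochila objetos_sacados)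

-- ===== LEMMAS AND PROOFS =====
-- once the fold's state is 'found' it stays fixed
theorem fold_found_fixed (l : List String) (c : Int) :
    l.foldl (fun st objeto =>
      if st.1 then st
      else
        let cc := st.2 + 1
        if objeto == "sable de luz" then (true, cc) else (false, cc))
      ((true, c) : Bool × Int) = (true, c) := by
  induction l with
  | nil => rfl
  | cons x xs ih => simpa using ih

theorem usar_eq_alt (mochila : List String) (objetos_sacados : Int) :
    usar_la_fuerza mochila objetos_sacados = usar_la_fuerza_alt mochila objetos_sacados := by
  induction mochila generalizing objetos_sacados with
  | nil => rfl
  | cons x xs ih =>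
    simp only [usar_la_fuerza, usar_la_fuerza_alt, List.foldl]
    by_cases h : x = "sable de luz"
    · simp only [h, beq_self_eq_true, if_pos, Bool.false_eq_true, if_neg, not_false_eq_true]
      exact (fold_found_fixed xs (objetos_sacados + 1)).symm
    · simp only [beq_eq_false_iff_ne.mpr h, Bool.false_eq_true, not_false_eq_true, if_neg]
      exact ih (objetos_sacados + 1)

-- ===== VERDICT (by name: the statement is the Claim_ definition above) =====
theorem usar_la_fuerza_spec : Claim_equal_usar_la_fuerza := by
  intro m k _
  exact usar_eq_alt m k
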